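-- pv_equiv track=rewrite | github.com/victorsaad00/URI---PYTHON | 1046.py | game_time_minutes
-- ===== SOURCE A (Python) =====
-- def game_time_minutes(start, end):
--     if start > end:
--         i=0
--         j=0
--         while start < 60:
--             i+=1
--             start+=1
--         while j < end:
--             j+=1
--         return j + i
--     elif start == end:
--         return 0
--     elif start < end:
--         return (end-start)
-- ===== SOURCE B (Python) =====
-- def game_time_minutes(start, end):
--     if start > end:
--         return max(0, 60 - start) + max(0, end)
--     elif start == end:
--         return 0
--     elif start < end:
--         return (end - start)
-- ===== Notes on version B (the rewrite author's own statement) =====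
-- stated objective: simpler
-- what changed: Replaced the two counting while-loops in the start>end branch by the closed-form arithmetic they compute, max(0, 60-start) + max(0, end), keeping the three-way branch.
import Mathlib
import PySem

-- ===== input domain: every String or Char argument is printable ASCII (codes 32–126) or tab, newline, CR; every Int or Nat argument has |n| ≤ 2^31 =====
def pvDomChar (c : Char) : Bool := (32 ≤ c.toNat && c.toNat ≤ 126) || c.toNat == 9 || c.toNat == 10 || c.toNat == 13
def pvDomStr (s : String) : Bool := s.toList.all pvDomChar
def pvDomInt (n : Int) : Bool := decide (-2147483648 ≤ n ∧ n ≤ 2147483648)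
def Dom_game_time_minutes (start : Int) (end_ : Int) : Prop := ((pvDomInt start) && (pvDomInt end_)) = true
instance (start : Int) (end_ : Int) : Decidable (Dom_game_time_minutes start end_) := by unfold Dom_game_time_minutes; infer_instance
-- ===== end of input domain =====

-- B replaces the two counting while-loops of the start>end branch by the closed-form
-- max 0 (60-start) + max 0 end_ (objective: simpler).

-- ===== PORT A =====
-- while start < 60: i += 1; start += 1
def pvLoop1 (start i : Int) : Int :=
  if start < 60 then pvLoop1 (start + 1) (i + 1) else i
termination_by (60 - start).toNat
decreasing_by omega

-- while j < end: j += 1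
def pvLoop2 (j end_ : Int) : Int :=
  if j < end_ then pvLoop2 (j + 1) end_ else j
termination_by (end_ - j).toNat
decreasing_by omega

def game_time_minutes (start : Int) (end_ : Int) : Int :=
  if start > end_ then
    pvLoop2 0 end_ + pvLoop1 start 0
  else if start = end_ then 0
  else end_ - start

-- ===== PORT B =====
def game_time_minutes_alt (start : Int) (end_ : Int) : Int :=
  if start > end_ then max 0 (60 - start) + max 0 end_
  else if start = end_ then 0
  else end_ - start

-- ===== PRECONDITION & SPEC =====
def Spec_game_time_minutes (start : Int) (end_ : Int) (out : Int) : Prop := out = game_time_minutes_alt start end_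
instance (start : Int) (end_ : Int) (out : Int) : Decidable (Spec_game_time_minutes start end_ out) := by unfold Spec_game_time_minutes; infer_instance

-- ===== CLAIM (what is proved, stated in full; the proofs are below) =====
def Claim_equal_game_time_minutes : Prop := ∀ (start : Int) (end_ : Int), Dom_game_time_minutes start end_ → Spec_game_time_minutes start end_ (game_time_minutes start end_)

-- ===== LEMMAS AND PROOFS =====

-- ===== VERDICT (by name: the statement is the Claim_ definition above) =====
theorem pvLoop1_eq (start i : Int) : pvLoop1 start i = i + max 0 (60 - start) := by
  fun_induction pvLoop1 start i with
  | case1 s i h => rename_i ih; rw [ih]; omega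
  | case2 s i h => omega

theorem pvLoop2_eq (j end_ : Int) : pvLoop2 j end_ = j + max 0 (end_ - j) := by
  fun_induction pvLoop2 j end_ with
  | case1 j h => rename_i ih; rw [ih]; omega
  | case2 j h => omega

theorem game_time_minutes_spec : Claim_equal_game_time_minutes := by
  intro start end_ _
  unfold Spec_game_time_minutes game_time_minutes game_time_minutes_alt
  rw [pvLoop1_eq, pvLoop2_eq]
  split_ifs <;> omega
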